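-- pv_equiv track=rewrite | github.com/txyyddss/actions-vps-vendor-scanner | src/main_issue_processor.py | _parse_markdown_form
-- ===== SOURCE A (Python) =====
-- def _parse_markdown_form(body: str) -> dict[str, str]:
--     """Executes _parse_markdown_form logic."""
--     fields: dict[str, str] = {}
--     current_key = ""
--     buffer: list[str] = []
--     for raw_line in body.splitlines():
--         line = raw_line.rstrip()
--         if line.startswith("### "):
--             if current_key:
--                 fields[current_key] = "\n".join(buffer).strip()
--             current_key = line[4:].strip().lower().replace(" ", "_")
--             buffer = []
--             continue
--         if line.startswith("<!--") and line.endswith("-->"):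
--             continue
--         buffer.append(line)
--     if current_key:
--         fields[current_key] = "\n".join(buffer).strip()
--     return fields
-- ===== SOURCE B (Python) =====
-- def _parse_markdown_form(body: str) -> dict[str, str]:
--     """Two-pass re-implementation: find header line indices, then build each
--     field from the slice between consecutive headers."""
--     lines = [l.rstrip() for l in body.splitlines()]
--     headers = [i for i, l in enumerate(lines) if l.startswith("### ")]
--     fields: dict[str, str] = {}
--     for h, nxt in zip(headers, headers[1:] + [len(lines)]):
--         key = lines[h][4:].strip().lower().replace(" ", "_")
--         content = [x for x in lines[h + 1:nxt]
--                    if not (x.startswith("<!--") and x.endswith("-->"))]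
--         fields[key] = "\n".join(content).strip()
--     return fields
-- ===== Notes on version B (the rewrite author's own statement) =====
-- stated objective: alternative
-- what changed: Replaces A's single stateful pass (current_key/buffer accumulators mutated per line) by a two-pass index scheme: collect the indices of markdown header lines, then build each field directly from the slice of lines between consecutive header indices.
import Mathlib
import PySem

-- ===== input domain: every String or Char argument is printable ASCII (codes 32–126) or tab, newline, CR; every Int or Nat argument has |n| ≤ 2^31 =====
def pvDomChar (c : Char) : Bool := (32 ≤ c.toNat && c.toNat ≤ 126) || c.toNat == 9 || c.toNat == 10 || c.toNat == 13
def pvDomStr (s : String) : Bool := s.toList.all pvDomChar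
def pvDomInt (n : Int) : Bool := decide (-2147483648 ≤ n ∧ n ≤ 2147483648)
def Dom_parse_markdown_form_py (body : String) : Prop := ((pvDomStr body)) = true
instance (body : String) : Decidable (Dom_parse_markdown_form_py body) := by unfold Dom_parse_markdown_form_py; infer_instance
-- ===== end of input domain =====

-- B re-implements the single-pass parser as a two-pass index scheme (find header
-- indices, then build each field from the slice between consecutive headers);
-- objective: alternative decomposition, same O(n) cost.

-- ===== PORT A =====
-- line[4:].strip().lower().replace(" ", "_")  (shared by both ports verbatim)
def pvKey (line : String) : String :=
  PySem.Str.replace (PySem.Str.lower (PySem.Str.strip (PySem.Str.slice line (some 4) none))) " " "_"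

-- line.startswith("<!--") and line.endswith("-->")
def pvIsComment (line : String) : Bool :=
  PySem.Str.startswith line "<!--" && PySem.Str.endswith line "-->"

-- "\n".join(buf).strip()
def pvContent (buf : List String) : String :=
  PySem.Str.strip (PySem.Str.join "\n" buf)

-- one iteration of A's for-loop; state = (fields, current_key, buffer)
def pvAStep (st : PySem.Dict String String × String × List String) (raw : String) :
    PySem.Dict String String × String × List String :=
  let line := PySem.Str.rstrip raw
  if PySem.Str.startswith line "### " then
    ((if st.2.1 == "" then st.1 else st.1.insert st.2.1 (pvContent st.2.2)), pvKey line, [])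
  else if pvIsComment line then st
  else (st.1, st.2.1, st.2.2 ++ [line])

def parse_markdown_form_py (body : String) : List (String × String) :=
  let st := (PySem.Str.splitlines body).foldl pvAStep (PySem.Dict.empty, "", [])
  (if st.2.1 == "" then st.1 else st.1.insert st.2.1 (pvContent st.2.2)).items

-- ===== PORT B =====
def parse_markdown_form_py_alt (body : String) : List (String × String) :=
  let lines := (PySem.Str.splitlines body).map PySem.Str.rstrip
  let headers := ((PySem.List.enumerate lines).filter
      (fun p => PySem.Str.startswith p.2 "### ")).map (·.1)
  let pairs := headers.zip (headers.drop 1 ++ [(lines.length : Int)])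
  (pairs.foldl (fun fields p =>
      let key := pvKey (PySem.List.pyGetD lines p.1 "")
      let content := (PySem.List.slice lines (some (p.1 + 1)) (some p.2)).filter
          (fun x => !pvIsComment x)
      fields.insert key (pvContent content)) PySem.Dict.empty).items

-- ===== PRECONDITION & SPEC =====
def Spec_parse_markdown_form_py (body : String) (out : List (String × String)) : Prop := out = parse_markdown_form_py_alt body
instance (body : String) (out : List (String × String)) : Decidable (Spec_parse_markdown_form_py body out) := by unfold Spec_parse_markdown_form_py; infer_instance

-- ===== CLAIM (what is proved, stated in full; the proofs are below) =====
def Claim_equal_parse_markdown_form_py : Prop := ∀ (body : String), Dom_parse_markdown_form_py body → Spec_parse_markdown_form_py body (parse_markdown_form_py body)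

-- ===== LEMMAS AND PROOFS =====

-- the common intermediate view: the list of (header line, raw section lines) pairs
def pvSegs : List String → List (String × List String)
  | [] => []
  | l :: ls =>
      if PySem.Str.startswith l "### " then
        (l, ls.takeWhile (fun x => !PySem.Str.startswith x "### ")) :: pvSegs ls
      else pvSegs ls

def pvFoldSegs (d : PySem.Dict String String) (ss : List (String × List String)) :
    PySem.Dict String String :=
  ss.foldl (fun d s =>
    d.insert (pvKey s.1) (pvContent (s.2.filter (fun x => !pvIsComment x)))) d

def pvFinish (d : PySem.Dict String String) (key : String) (buf : List String) :
    PySem.Dict String String :=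
  if key == "" then d else d.insert key (pvContent buf)

def pvStep' (st : PySem.Dict String String × String × List String) (line : String) :
    PySem.Dict String String × String × List String :=
  if PySem.Str.startswith line "### " then (pvFinish st.1 st.2.1 st.2.2, pvKey line, [])
  else if pvIsComment line then st
  else (st.1, st.2.1, st.2.2 ++ [line])

lemma pvFinish_ne (d : PySem.Dict String String) (key : String) (buf : List String)
    (h : key ≠ "") : pvFinish d key buf = d.insert key (pvContent buf) := by
  rw [pvFinish, if_neg (by simpa using h)]

lemma pvFinish_empty_key (d : PySem.Dict String String) (buf : List String) :
    pvFinish d "" buf = d := rfl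

-- a line that can be a header yields a nonempty key
def pvGood (l : String) : Prop := PySem.Str.startswith l "### " = true → pvKey l ≠ ""

lemma pv_replace_go_ne_nil (old new : List Char) (hnew : new ≠ []) :
    ∀ (fuel : Nat) (l acc : List Char), (l ≠ [] ∨ acc ≠ []) →
      PySem.Chars.replace.go old new fuel l acc ≠ [] := by
  intro fuel
  induction fuel with
  | zero =>
      intro l acc h
      simp only [PySem.Chars.replace.go]
      rcases h with h | h <;> simp [h]
  | succ n ih =>
      intro l acc h
      cases l with
      | nil =>
          simp only [PySem.Chars.replace.go]
          rcases h with h | h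
          · exact absurd rfl h
          · simpa using h
      | cons c t =>
          simp only [PySem.Chars.replace.go]
          split
          · exact ih _ _ (Or.inr (by simp [hnew]))
          · exact ih _ _ (Or.inr (by simp))

lemma pv_good_rstrip (raw : String) : pvGood (PySem.Str.rstrip raw) := by
  unfold pvGood
  intro hp
  have hsl : (PySem.Str.rstrip raw).toList = PySem.Chars.rstrip raw.toList := by
    simp [PySem.Str.rstrip]
  have hpre : ['#','#','#',' '] <+: PySem.Chars.rstrip raw.toList := by
    have h0 := (PySem.Chars.startswith_iff (PySem.Str.rstrip raw).toList "### ".toList).mp (by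
      simpa [PySem.Str.startswith] using hp)
    rw [hsl] at h0
    exact (show "### ".toList = ['#','#','#',' '] from rfl) ▸ h0
  rcases hpre with ⟨r, hr⟩
  have hdrop : (PySem.Chars.rstrip raw.toList).drop 4 = r := by
    rw [← hr]; exact List.drop_left' (by simp)
  have hkl : (pvKey (PySem.Str.rstrip raw)).toList
      = PySem.Chars.replace (PySem.Chars.lower (PySem.Chars.strip r)) [' '] ['_'] := by
    simp only [pvKey, PySem.Str.replace, PySem.Str.lower, PySem.Str.strip, PySem.Str.slice]
    simp [hsl, PySem.Chars.slice_eq_listSlice]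
    rw [PySem.List.slice_from _ (by norm_num : (0:Int) ≤ (4:Int)),
      show Int.toNat 4 = 4 from rfl, hdrop]
  have hmid : PySem.Chars.strip r ≠ [] := by
    intro hmid0
    have hallr : ∀ c ∈ r, PySem.Chars.isspace c = true := by
      have h1 : List.dropWhile PySem.Chars.isspace
          ((List.dropWhile PySem.Chars.isspace r).reverse) = [] := by
        have h2 := congrArg List.reverse hmid0
        simpa [PySem.Chars.strip, PySem.Chars.rstrip, PySem.Chars.lstrip] using h2
      have h2 : ∀ c ∈ (List.dropWhile PySem.Chars.isspace r).reverse,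
          PySem.Chars.isspace c = true := List.dropWhile_eq_nil_iff.mp h1
      intro c hc
      rcases (List.mem_append.mp ((List.takeWhile_append_dropWhile
          (p := PySem.Chars.isspace) (l := r)) ▸ hc)) with h | h
      · exact List.mem_takeWhile_imp h
      · exact h2 c (List.mem_reverse.mpr h)
    have hkey : ∀ c, (PySem.Chars.rstrip raw.toList).getLast? = some c →
        PySem.Chars.isspace c = false := by
      intro c hc
      rw [← List.head?_reverse] at hc
      have hdw : (PySem.Chars.rstrip raw.toList).reverse
          = List.dropWhile PySem.Chars.isspace raw.toList.reverse := by
        simp [PySem.Chars.rstrip]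
      rw [hdw] at hc
      have hx := List.head?_dropWhile_not PySem.Chars.isspace raw.toList.reverse
      rw [hc] at hx
      exact hx
    rw [← hr] at hkey
    cases r with
    | nil =>
        have h3 := hkey ' ' (by decide)
        simp [show PySem.Chars.isspace ' ' = true from by decide] at h3
    | cons c0 r' =>
        have hne : (c0 :: r') ≠ [] := by simp
        have h3 := hkey ((c0 :: r').getLast hne) (by
          rw [List.getLast?_append_of_ne_nil _ hne]
          exact List.getLast?_eq_some_getLast hne)
        rw [hallr _ (List.getLast_mem hne)] at h3
        cases h3
  have hlow : PySem.Chars.lower (PySem.Chars.strip r) ≠ [] := by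
    simpa [PySem.Chars.lower] using hmid
  have hrep : PySem.Chars.replace (PySem.Chars.lower (PySem.Chars.strip r)) [' '] ['_'] ≠ [] := by
    simp only [PySem.Chars.replace]
    rw [if_neg (by decide)]
    exact pv_replace_go_ne_nil [' '] ['_'] (by decide) _ _ _ (Or.inl hlow)
  intro heq
  have h9 := congrArg String.toList heq
  rw [hkl] at h9
  exact hrep (by simpa using h9)

lemma pv_aloop (ls : List String) (hg : ∀ l ∈ ls, pvGood l) :
    ∀ (d : PySem.Dict String String) (key : String) (buf : List String),
      pvFinish (ls.foldl pvStep' (d, key, buf)).1 (ls.foldl pvStep' (d, key, buf)).2.1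
          (ls.foldl pvStep' (d, key, buf)).2.2
      = pvFoldSegs
          (pvFinish d key (buf ++ (ls.takeWhile (fun x => !PySem.Str.startswith x "### ")).filter
            (fun x => !pvIsComment x)))
          (pvSegs ls) := by
  induction ls with
  | nil =>
      intro d key buf
      simp [pvSegs, pvFoldSegs]
  | cons l ls ih =>
      intro d key buf
      have hgl : pvGood l := hg l (List.mem_cons_self ..)
      have hgt : ∀ x ∈ ls, pvGood x := fun x hx => hg x (List.mem_cons_of_mem _ hx)
      by_cases hhdr : PySem.Str.startswith l "### " = true
      · have hkey : pvKey l ≠ "" := hgl hhdr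
        simp only [List.foldl_cons, pvStep', hhdr, if_pos]
        rw [ih hgt, pvFinish_ne _ _ _ hkey]
        simp only [pvSegs, hhdr, if_pos, List.takeWhile_cons, Bool.not_true, pvFoldSegs,
          List.foldl_cons, List.nil_append, Bool.false_eq_true, if_false, List.filter_nil,
          List.append_nil]
      · simp only [Bool.not_eq_true] at hhdr
        by_cases hcom : pvIsComment l = true
        · simp only [List.foldl_cons, pvStep', hhdr, Bool.false_eq_true, if_false, hcom, if_pos]
          rw [ih hgt]
          simp only [pvSegs, Bool.false_eq_true, if_false, List.takeWhile_cons, hhdr,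
            Bool.not_false, List.filter_cons, hcom, if_pos, Bool.not_true, if_false,
            Bool.false_eq_true]
        · simp only [Bool.not_eq_true] at hcom
          simp only [List.foldl_cons, pvStep', hhdr, Bool.false_eq_true, if_false, hcom, if_false]
          rw [ih hgt]
          simp only [pvSegs, Bool.false_eq_true, if_false, List.takeWhile_cons, hhdr,
            Bool.not_false, List.filter_cons, hcom, List.append_assoc, List.singleton_append,
            Bool.not_false, if_true]

def pvHeadersFrom (ls : List String) (s : Int) : List Int :=
  ((PySem.List.enumerate ls s).filter (fun p => PySem.Str.startswith p.2 "### ")).map (·.1)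

lemma pv_headersFrom_headD (ls : List String) (s : Int) :
    (pvHeadersFrom ls s).headD (s + ls.length)
      = s + ((ls.takeWhile (fun x => !PySem.Str.startswith x "### ")).length : Int) := by
  induction ls generalizing s with
  | nil => simp [pvHeadersFrom, PySem.List.enumerate_nil]
  | cons l ls ih =>
      by_cases hhdr : PySem.Str.startswith l "### " = true
      · simp only [pvHeadersFrom, PySem.List.enumerate_cons, List.filter_cons, hhdr, if_pos,
          List.map_cons, List.headD_cons, List.takeWhile_cons, Bool.not_true,
          Bool.false_eq_true, if_false, List.length_nil, Nat.cast_zero, add_zero]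
      · simp only [Bool.not_eq_true] at hhdr
        have h2 := ih (s + 1)
        simp only [pvHeadersFrom, PySem.List.enumerate_cons, List.filter_cons, hhdr,
          Bool.false_eq_true, if_false, List.takeWhile_cons, Bool.not_false, if_true,
          List.length_cons] at h2 ⊢
        rw [show ((ls.length + 1 : Nat) : Int) = (ls.length : Int) + 1 by push_cast; ring,
          show s + ((ls.length : Int) + 1) = s + 1 + (ls.length : Int) by ring, h2,
          show (((ls.takeWhile (fun x => !PySem.Str.startswith x "### ")).length + 1 : Nat) : Int)
            = (((ls.takeWhile (fun x => !PySem.Str.startswith x "### ")).length : Nat) : Int) + 1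
            by push_cast; ring]
        ring

lemma pv_take_takeWhile {α : Type} (p : α → Bool) (l : List α) :
    l.take (l.takeWhile p).length = l.takeWhile p := by
  induction l with
  | nil => rfl
  | cons a t ih => by_cases h : p a <;> simp [h, ih]

lemma pv_getD_mid (pre : List String) (l : String) (ls : List String) :
    PySem.List.pyGetD (pre ++ l :: ls) ((pre.length : Nat) : Int) "" = l := by
  rw [PySem.List.pyGetD_natCast, List.getD_eq_getElem?_getD,
    List.getElem?_append_right (le_refl _)]
  simp

lemma pv_slice_mid (pre : List String) (l : String) (ls : List String) (k : Nat) :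
    PySem.List.slice (pre ++ l :: ls) (some (((pre.length + 1 : Nat)) : Int))
      (some (((pre.length + 1 + k : Nat)) : Int)) = ls.take k := by
  rw [PySem.List.slice_natCast, Nat.add_sub_cancel_left]
  have h : pre ++ l :: ls = (pre ++ [l]) ++ ls := by simp
  rw [h, List.drop_left' (by simp)]

lemma pv_headersFrom_none (ls : List String) (t : Int) (h : pvHeadersFrom ls t = []) :
    ∀ x ∈ ls, PySem.Str.startswith x "### " = false := by
  intro x hx
  simp only [pvHeadersFrom, List.map_eq_nil_iff, List.filter_eq_nil_iff] at h
  rcases List.mem_iff_getElem.mp hx with ⟨k, hk, rfl⟩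
  have := h ((t + k : Int), ls[k]) (by
    rw [PySem.List.mem_enumerate_iff]
    exact ⟨k, hk, rfl⟩)
  simpa using this

lemma pv_segs_of_none (ls : List String)
    (h : ∀ x ∈ ls, PySem.Str.startswith x "### " = false) : pvSegs ls = [] := by
  induction ls with
  | nil => rfl
  | cons a t ih =>
      simp only [pvSegs, h a (List.mem_cons_self ..), Bool.false_eq_true, if_false]
      exact ih (fun x hx => h x (List.mem_cons_of_mem _ hx))

lemma pv_bpairs (ls : List String) : ∀ (pre : List String),
    ((pvHeadersFrom ls (pre.length : Int)).zip
        ((pvHeadersFrom ls (pre.length : Int)).drop 1 ++ [((pre ++ ls).length : Int)])).map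
      (fun p => (PySem.List.pyGetD (pre ++ ls) p.1 "",
                 PySem.List.slice (pre ++ ls) (some (p.1 + 1)) (some p.2)))
    = pvSegs ls := by
  induction ls with
  | nil => intro pre; simp [pvHeadersFrom, PySem.List.enumerate_nil, pvSegs]
  | cons l ls ih =>
      intro pre
      by_cases hhdr : PySem.Str.startswith l "### " = true
      · have hKeyIdx := pv_headersFrom_headD ls ((pre.length : Int) + 1)
        have h2 := ih (pre ++ [l])
        simp only [List.append_assoc, List.singleton_append, List.length_append,
          List.length_cons, List.length_nil] at h2 ⊢
        have hcast : (((pre.length + (0 + 1)) : Nat) : Int) = (pre.length : Int) + 1 := by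
          push_cast; ring
        rw [hcast] at h2
        simp only [pvHeadersFrom, PySem.List.enumerate_cons, List.filter_cons, hhdr, if_pos,
          List.map_cons, List.drop_succ_cons, List.drop_zero] at hKeyIdx h2 ⊢
        have ha : (pre.length : Int) + 1 = (((pre.length + 1 : Nat)) : Int) := by push_cast; ring
        rcases hH : ((PySem.List.enumerate ls ((pre.length : Int) + 1)).filter
            (fun p => PySem.Str.startswith p.2 "### ")).map (·.1) with _ | ⟨h, t⟩
        · rw [hH] at hKeyIdx h2 ⊢
          have hnone := pv_headersFrom_none ls ((pre.length : Int) + 1) (by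
            simpa only [pvHeadersFrom] using hH)
          have htw : ls.takeWhile (fun x => !PySem.Str.startswith x "### ") = ls :=
            List.takeWhile_eq_self_iff.mpr (fun x hx => by
              simp only [hnone x hx, Bool.not_false])
          simp only [List.nil_append, List.zip_cons_cons, List.zip_nil_left, List.map_cons,
            List.map_nil, pvSegs, hhdr, if_pos, htw, pv_segs_of_none ls hnone]
          rw [pv_getD_mid pre l ls,
            show ((pre.length + (ls.length + 1) : Nat) : Int)
              = (((pre.length + 1 + ls.length : Nat)) : Int) from congrArg _ (by omega),
            ha, pv_slice_mid pre l ls ls.length, List.take_length]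
        · rw [hH] at hKeyIdx h2 ⊢
          simp only [List.headD_cons] at hKeyIdx
          simp only [List.drop_succ_cons, List.drop_zero] at h2
          simp only [List.cons_append, List.zip_cons_cons, List.map_cons, pvSegs, hhdr, if_pos]
          rw [h2, pv_getD_mid pre l ls, hKeyIdx, ha,
            show (((pre.length + 1 : Nat)) : Int)
                + ((ls.takeWhile (fun x => !PySem.Str.startswith x "### ")).length : Int)
              = (((pre.length + 1
                + (ls.takeWhile (fun x => !PySem.Str.startswith x "### ")).length : Nat)) : Int)
              from by push_cast; ring,
            pv_slice_mid, pv_take_takeWhile]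
      · simp only [Bool.not_eq_true] at hhdr
        have h2 := ih (pre ++ [l])
        simp only [List.append_assoc, List.singleton_append, List.length_append,
          List.length_cons, List.length_nil] at h2 ⊢
        have hcast : (((pre.length + (0 + 1)) : Nat) : Int) = (pre.length : Int) + 1 := by
          push_cast; ring
        rw [hcast] at h2
        simp only [pvHeadersFrom, PySem.List.enumerate_cons, List.filter_cons, hhdr,
          Bool.false_eq_true, if_false, pvSegs]
        exact h2

-- ===== VERDICT (by name: the statement is the Claim_ definition above) =====
theorem parse_markdown_form_py_spec : Claim_equal_parse_markdown_form_py := by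
  intro body _
  show parse_markdown_form_py body = parse_markdown_form_py_alt body
  unfold parse_markdown_form_py parse_markdown_form_py_alt
  have hg : ∀ l ∈ (PySem.Str.splitlines body).map PySem.Str.rstrip, pvGood l := by
    intro l hl
    rcases List.mem_map.mp hl with ⟨raw, _, rfl⟩
    exact pv_good_rstrip raw
  have hA : (PySem.Str.splitlines body).foldl pvAStep
        (PySem.Dict.empty, "", ([] : List String))
      = ((PySem.Str.splitlines body).map PySem.Str.rstrip).foldl pvStep'
        (PySem.Dict.empty, "", ([] : List String)) := by
    rw [List.foldl_map]
    rfl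
  rw [hA]
  have hAmain := pv_aloop ((PySem.Str.splitlines body).map PySem.Str.rstrip) hg
    PySem.Dict.empty "" []
  simp only [pvFinish_empty_key] at hAmain
  have hB := pv_bpairs ((PySem.Str.splitlines body).map PySem.Str.rstrip) []
  simp only [List.nil_append, List.length_nil, Nat.cast_zero] at hB
  have hBfold :
      (((pvHeadersFrom ((PySem.Str.splitlines body).map PySem.Str.rstrip) 0).zip
          ((pvHeadersFrom ((PySem.Str.splitlines body).map PySem.Str.rstrip) 0).drop 1
            ++ [((((PySem.Str.splitlines body).map PySem.Str.rstrip)).length : Int)])).foldl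
        (fun fields p =>
          fields.insert
            (pvKey (PySem.List.pyGetD ((PySem.Str.splitlines body).map PySem.Str.rstrip) p.1 ""))
            (pvContent ((PySem.List.slice ((PySem.Str.splitlines body).map PySem.Str.rstrip)
                (some (p.1 + 1)) (some p.2)).filter (fun x => !pvIsComment x))))
        PySem.Dict.empty)
      = pvFoldSegs PySem.Dict.empty (pvSegs ((PySem.Str.splitlines body).map PySem.Str.rstrip)) := by
    rw [pvFoldSegs, ← hB, List.foldl_map]
  show (pvFinish
      ((((PySem.Str.splitlines body).map PySem.Str.rstrip).foldl pvStep'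
        (PySem.Dict.empty, "", [])).1)
      ((((PySem.Str.splitlines body).map PySem.Str.rstrip).foldl pvStep'
        (PySem.Dict.empty, "", [])).2.1)
      ((((PySem.Str.splitlines body).map PySem.Str.rstrip).foldl pvStep'
        (PySem.Dict.empty, "", [])).2.2)).items = _
  rw [hAmain, ← hBfold]
  rfl
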